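-- pv_equiv track=rewrite | github.com/0-jwook/algorithm | 백준/Silver/2164. 카드2/카드2.py | f
-- ===== SOURCE A (Python) =====
-- def f(n):
--     if n == 1: return 1
--     p = 1
--     while p * 2 <= n:
--         p *= 2
--     if p == n:
--         return n
--     return (n-p)*2
-- ===== SOURCE B (Python) =====
-- def f(n):
--     # Survivor of the queue-elimination game by recursive halving: one full
--     # pass over a queue of size n discards the odd cards and reduces the game
--     # to the same game on the n // 2 even cards (rotated by one when n is odd).
--     if n == 1:
--         return 1
--     s = f(n // 2)
--     if n % 2 == 0:
--         return 2 * s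
--     if s == n // 2:
--         return 2
--     return 2 * s + 2
-- ===== Notes on version B (the rewrite author's own statement) =====
-- stated objective: alternative
-- what changed: Replaces A's doubling loop plus closed-form power-of-two arithmetic with a recursive halving of the game: the survivor of n cards is computed from the survivor of the n // 2 even cards via a parity recurrence.
-- outside the precondition, e.g. on f(0): A returns -2, B raises RecursionError; on f(-3): A returns -8, B raises RecursionError
import Mathlib
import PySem

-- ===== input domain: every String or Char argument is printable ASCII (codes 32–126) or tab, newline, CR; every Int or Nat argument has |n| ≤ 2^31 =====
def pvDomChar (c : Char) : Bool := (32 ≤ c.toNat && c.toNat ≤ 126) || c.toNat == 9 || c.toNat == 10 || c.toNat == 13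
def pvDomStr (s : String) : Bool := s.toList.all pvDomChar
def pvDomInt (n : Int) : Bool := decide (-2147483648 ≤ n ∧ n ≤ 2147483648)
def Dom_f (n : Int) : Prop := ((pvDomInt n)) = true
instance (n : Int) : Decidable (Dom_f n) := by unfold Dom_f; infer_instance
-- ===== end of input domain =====

-- B replaces A's doubling loop + closed-form power-of-two arithmetic by a recursive
-- halving of the elimination game (parity recurrence on the survivor of n // 2 cards);
-- return values agree on all n ≥ 1 (Pre_f); for n ≤ 0 A returns (n-1)*2 while B
-- recurses forever on n // 2 and raises RecursionError.

-- ===== PORT A =====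
-- while p * 2 <= n: p *= 2   — fueled recursion; fuel n.toNat is enough since p
-- doubles from 1 and 2^m > m, so the guard fails before the fuel runs out (n ≥ 1);
-- for n ≤ 0 the guard is false at once and the fuel is irrelevant.
def fLoop (fuel : Nat) (n p : Int) : Int :=
  match fuel with
  | 0 => p
  | fuel + 1 => if p * 2 ≤ n then fLoop fuel n (p * 2) else p

def f (n : Int) : Int :=
  if n = 1 then 1
  else
    let p := fLoop n.toNat n 1
    if p = n then n else (n - p) * 2

-- ===== PORT B =====
-- the recursion of Source B, with fuel as a totality guard: n halves at every call, so
-- fuel n.toNat is enough for every n ≥ 1 (Pre_f); for n ≤ 0 Python B recurses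
-- forever (RecursionError), which is excluded by Pre_f.
def altGo : Nat → Int → Int
  | 0, _ => 0
  | fuel + 1, n =>
    if n = 1 then 1
    else
      let s := altGo fuel (PySem.Int.floordiv n 2)
      if PySem.Int.mod n 2 = 0 then 2 * s
      else if s = PySem.Int.floordiv n 2 then 2
      else 2 * s + 2

def f_alt (n : Int) : Int := altGo n.toNat n

-- ===== PRECONDITION & SPEC =====
-- Pre_f excludes n ≤ 0, where A still returns the accidental value (n-1)*2 but B's
-- recursion never terminates (RecursionError).
def Pre_f (n : Int) : Prop := 1 ≤ n
instance (n : Int) : Decidable (Pre_f n) := by unfold Pre_f; infer_instance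
def pvWitness_f : Int := 6

def Spec_f (n : Int) (out : Int) : Prop := out = f_alt n
instance (n : Int) (out : Int) : Decidable (Spec_f n out) := by unfold Spec_f; infer_instance

-- ===== CLAIM (what is proved, stated in full; the proofs are below) =====
def Claim_equal_f : Prop := ∀ (n : Int), Dom_f n → Pre_f n → Spec_f n (f n)

-- ===== LEMMAS AND PROOFS =====

-- the fueled while loop of A: from 1 ≤ p ≤ n and enough fuel it lands on p·2^k
-- with p·2^k ≤ n < p·2^(k+1)
lemma fLoop_spec : ∀ fuel : Nat, ∀ n p : Int, 1 ≤ p → p ≤ n → n < p * 2 ^ fuel →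
    ∃ k : Nat, fLoop fuel n p = p * 2 ^ k ∧ p * 2 ^ k ≤ n ∧ n < p * 2 ^ (k + 1) := by
  intro fuel
  induction fuel with
  | zero => intro n p h1 h2 h3; simp at h3; omega
  | succ fuel ih =>
    intro n p h1 h2 h3
    rw [fLoop]
    by_cases hc : p * 2 ≤ n
    · rw [if_pos hc]
      have h3' : n < p * 2 * 2 ^ fuel := by rw [pow_succ] at h3; nlinarith
      obtain ⟨k, hk1, hk2, hk3⟩ := ih n (p * 2) (by omega) hc h3'
      refine ⟨k + 1, by rw [hk1]; ring, ?_, ?_⟩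
      · calc p * 2 ^ (k + 1) = p * 2 * 2 ^ k := by ring
          _ ≤ n := hk2
      · calc n < p * 2 * 2 ^ (k + 1) := hk3
          _ = p * 2 ^ (k + 1 + 1) := by ring
    · rw [if_neg hc]
      refine ⟨0, by ring, by simpa using h2, ?_⟩
      have : p * 2 ^ (0 + 1) = p * 2 := by ring
      omega

lemma log2_unique {k m : Nat} (h1 : 2 ^ k ≤ m) (h2 : m < 2 ^ (k + 1)) : Nat.log2 m = k := by
  rw [Nat.log2_eq_log_two]
  exact Nat.log_eq_of_pow_le_of_lt_pow h1 h2

-- A's value in terms of log2 of n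
lemma f_eq (n : Int) (hn : 1 ≤ n) :
    f n = (if 2 ^ Nat.log2 n.toNat = n.toNat then n
           else (n - ((2 ^ Nat.log2 n.toNat : Nat) : Int)) * 2) := by
  rcases eq_or_lt_of_le hn with h1 | h2
  · rw [← h1]; decide
  · have hm : ((n.toNat : Int)) = n := by omega
    have hpowcast : ∀ j : Nat, (((2 ^ j : Nat) : Int)) = 2 ^ j := by intro j; push_cast; ring
    have hfuel : n < 1 * 2 ^ n.toNat := by
      have h := Nat.lt_two_pow_self (n := n.toNat)
      have h2' : ((n.toNat : Int)) < ((2 ^ n.toNat : Nat) : Int) := by exact_mod_cast h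
      rw [hpowcast] at h2'; omega
    obtain ⟨k, heq, hle, hlt⟩ := fLoop_spec n.toNat n 1 le_rfl hn hfuel
    rw [one_mul] at heq hle hlt
    have hleN : 2 ^ k ≤ n.toNat := by
      have := hpowcast k; omega
    have hltN : n.toNat < 2 ^ (k + 1) := by
      have := hpowcast (k + 1); omega
    rw [log2_unique hleN hltN]
    unfold f
    rw [if_neg (by omega : ¬ n = 1)]
    simp only
    rw [heq]
    by_cases hp : (2 : Nat) ^ k = n.toNat
    · have hpI : (2 : Int) ^ k = n := by
        have := hpowcast k; omega
      rw [if_pos hpI, if_pos hp]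
    · have hpI : ¬ (2 : Int) ^ k = n := by
        have := hpowcast k; omega
      rw [if_neg hpI, if_neg hp, hpowcast]

-- B's recursion computes the same closed form, by induction on the fuel
lemma altGo_eq : ∀ fuel : Nat, ∀ n : Int, 1 ≤ n → n.toNat ≤ fuel →
    altGo fuel n = (if 2 ^ Nat.log2 n.toNat = n.toNat then n
                    else (n - ((2 ^ Nat.log2 n.toNat : Nat) : Int)) * 2) := by
  intro fuel
  induction fuel with
  | zero => intro n h1 h2; omega
  | succ fuel ih =>
    intro n h1 h2
    by_cases hn1 : n = 1
    · subst hn1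
      have hc : (2 : Nat) ^ Nat.log2 (Int.toNat 1) = Int.toNat 1 := by decide
      rw [if_pos hc]
      simp [altGo]
    · have hm2 : 2 ≤ n.toNat := by omega
      have hnm : ((n.toNat : Int)) = n := by omega
      have hfd : PySem.Int.floordiv n 2 = ((n.toNat / 2 : Nat) : Int) := by
        rw [← hnm]; exact_mod_cast PySem.Int.floordiv_natCast n.toNat 2
      have hmod : PySem.Int.mod n 2 = ((n.toNat % 2 : Nat) : Int) := by
        rw [← hnm]; exact_mod_cast PySem.Int.mod_natCast n.toNat 2
      have hhalf1 : (1 : Int) ≤ ((n.toNat / 2 : Nat) : Int) := by omega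
      have hhalfT : ((n.toNat / 2 : Nat) : Int).toNat = n.toNat / 2 := by omega
      have hs := ih ((n.toNat / 2 : Nat) : Int) hhalf1 (by omega)
      rw [hhalfT] at hs
      have hq0 : 2 ^ Nat.log2 (n.toNat / 2) ≤ n.toNat / 2 := Nat.log2_self_le (by omega)
      have hq1 : n.toNat / 2 < 2 ^ (Nat.log2 (n.toNat / 2) + 1) := Nat.lt_log2_self
      have hd1 : (2 : Nat) ^ (Nat.log2 (n.toNat / 2) + 1) = 2 * 2 ^ Nat.log2 (n.toNat / 2) :=
        pow_succ' 2 _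
      have hd2 : (2 : Nat) ^ (Nat.log2 (n.toNat / 2) + 1 + 1)
          = 2 * (2 * 2 ^ Nat.log2 (n.toNat / 2)) := by rw [pow_succ', hd1]
      have hlog : Nat.log2 n.toNat = Nat.log2 (n.toNat / 2) + 1 :=
        log2_unique (by omega) (by omega)
      rw [show altGo (fuel + 1) n
          = (if n = 1 then 1
             else
               if PySem.Int.mod n 2 = 0 then 2 * altGo fuel (PySem.Int.floordiv n 2)
               else if altGo fuel (PySem.Int.floordiv n 2) = PySem.Int.floordiv n 2 then 2
               else 2 * altGo fuel (PySem.Int.floordiv n 2) + 2) from rfl,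
        if_neg hn1, hfd, hmod, hs, hlog, hd1]
      rw [hd1] at hq1
      generalize (2 : Nat) ^ Nat.log2 (n.toNat / 2) = q at hq0 hq1 ⊢
      split_ifs <;> omega

-- ===== VERDICT (by name: the statement is the Claim_ definition above) =====
theorem f_spec : Claim_equal_f := by
  intro n _ hn
  have hn' : (1 : Int) ≤ n := hn
  unfold Spec_f
  rw [f_eq n hn', f_alt, altGo_eq n.toNat n hn' le_rfl]
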